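-- pv_equiv track=rewrite | github.com/truly-not-taken/aoc2024 | 10/solve.py | score2
-- ===== SOURCE A (Python) =====
-- def score2(topomap, x, y, step):
--     n = len(topomap)
--     if x not in range(n) or y not in range(n):
--         return 0;
--     if topomap[y][x]!=step:
--         return 0
--     if step==9:
--         return 1
--     return (
--         score2(topomap, x+1, y, step+1) +
--         score2(topomap, x-1, y, step+1) +
--         score2(topomap, x, y+1, step+1) +
--         score2(topomap, x, y-1, step+1)
--     )
-- ===== SOURCE B (Python) =====
-- def score2(topomap, x, y, step):
--     n = len(topomap)
--     if not (0 <= x < n and 0 <= y < n):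
--         return 0
--     if topomap[y][x] != step:
--         return 0
--     if step == 9:
--         return 1
--     # bottom-up level DP: cnt maps each cell of the current level to the number
--     # of increasing trails from it to a 9; one table per level, no re-exploration
--     cnt = {(i, j): 1 for j in range(n) for i in range(n) if topomap[j][i] == 9}
--     s = 8
--     while s >= step and cnt:
--         cnt = {(i, j): cnt.get((i + 1, j), 0) + cnt.get((i - 1, j), 0)
--                        + cnt.get((i, j + 1), 0) + cnt.get((i, j - 1), 0)
--                for j in range(n) for i in range(n) if topomap[j][i] == s}
--         s -= 1
--     return cnt.get((x, y), 0)
-- ===== Notes on version B (the rewrite author's own statement) =====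
-- stated objective: alternative
-- what changed: Replaces A's 4-way branching recursion over trails with a bottom-up level-by-level DP: one dict per height level mapping each cell to its trail count, built from the level above, so each cell is processed once per level instead of once per trail through it.
-- outside the precondition, e.g. on score2([[5, 0], [0]], 0, 0, 5): A returns 0, B raises IndexError
import Mathlib
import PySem

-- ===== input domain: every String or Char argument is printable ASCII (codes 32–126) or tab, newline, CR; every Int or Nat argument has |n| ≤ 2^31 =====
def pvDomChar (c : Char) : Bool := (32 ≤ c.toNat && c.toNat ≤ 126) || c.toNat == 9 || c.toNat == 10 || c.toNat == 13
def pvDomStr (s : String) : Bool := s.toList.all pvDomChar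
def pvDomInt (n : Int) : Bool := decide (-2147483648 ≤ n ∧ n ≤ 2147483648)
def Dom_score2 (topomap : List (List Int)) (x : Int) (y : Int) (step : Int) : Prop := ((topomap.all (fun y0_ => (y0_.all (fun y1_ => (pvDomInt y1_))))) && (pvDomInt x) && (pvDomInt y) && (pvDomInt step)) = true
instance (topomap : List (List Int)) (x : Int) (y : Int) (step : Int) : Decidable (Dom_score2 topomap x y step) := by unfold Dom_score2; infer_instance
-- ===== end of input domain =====

-- B replaces A's 4-way branching recursion by a bottom-up per-level dict DP
-- (count trails from each cell of one height level at a time); alternative.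

-- ===== PORT A =====
-- shared cell accessor: topomap[j][i] (both Pythons read cells exactly this way)
def pvCell (t : List (List Int)) (i j : Int) : Int :=
  PySem.List.pyGetD (PySem.List.pyGetD t j []) i 0

-- upper bound on cell values, used only as a termination measure for the port of A
def pvMax (t : List (List Int)) : Int := t.flatten.foldl max 0

lemma pvLe_foldl_max (l : List Int) (b : Int) : b ≤ l.foldl max b := by
  induction l generalizing b with
  | nil => simp
  | cons a l ih => exact le_trans (le_max_left b a) (ih _)

lemma pvMem_le_foldl_max (l : List Int) (b a : Int) (h : a ∈ l) : a ≤ l.foldl max b := by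
  induction l generalizing b with
  | nil => cases h
  | cons c l ih =>
    rw [List.mem_cons] at h
    rcases h with rfl | h
    · exact le_trans (le_max_right b a) (pvLe_foldl_max l _)
    · exact ih _ h

lemma pvCell_le (t : List (List Int)) (i j : Int) : pvCell t i j ≤ pvMax t := by
  unfold pvCell pvMax PySem.List.pyGetD
  cases hc : PySem.List.pyGet? ((PySem.List.pyGet? t j).getD []) i with
  | none => simpa [hc] using pvLe_foldl_max t.flatten 0
  | some a =>
    simp only [Option.getD_some]
    apply pvMem_le_foldl_max
    have ha := PySem.List.mem_of_pyGet?_eq_some _ hc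
    cases hrow : PySem.List.pyGet? t j with
    | none => rw [hrow] at ha; simp at ha
    | some row =>
      rw [hrow] at ha
      exact List.mem_flatten.2 ⟨row, PySem.List.mem_of_pyGet?_eq_some _ hrow, ha⟩

def score2 (topomap : List (List Int)) (x : Int) (y : Int) (step : Int) : Int :=
  let n : Int := (topomap.length : Int)
  if _h1 : ¬(0 ≤ x ∧ x < n) ∨ ¬(0 ≤ y ∧ y < n) then 0
  else if _h2 : pvCell topomap x y ≠ step then 0
  else if _h3 : step = 9 then 1
  else
    score2 topomap (x + 1) y (step + 1) +
    score2 topomap (x - 1) y (step + 1) +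
    score2 topomap x (y + 1) (step + 1) +
    score2 topomap x (y - 1) (step + 1)
termination_by (pvMax topomap + 1 - step).toNat
decreasing_by
  all_goals (have hle := pvCell_le topomap x y; omega)

-- ===== PORT B =====
-- {(i, j): 1 for j in range(n) for i in range(n) if topomap[j][i] == 9}
def pvBuild9 (t : List (List Int)) : PySem.Dict (Int × Int) Int :=
  (PySem.List.pyRange 0 t.length 1).foldl (fun d j =>
    (PySem.List.pyRange 0 t.length 1).foldl (fun d i =>
      if pvCell t i j = 9 then d.insert (i, j) 1 else d) d) PySem.Dict.empty

-- one body of the while loop: the dict comprehension for level s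
def pvStep (t : List (List Int)) (cnt : PySem.Dict (Int × Int) Int) (s : Int) :
    PySem.Dict (Int × Int) Int :=
  (PySem.List.pyRange 0 t.length 1).foldl (fun d j =>
    (PySem.List.pyRange 0 t.length 1).foldl (fun d i =>
      if pvCell t i j = s then
        d.insert (i, j) (cnt.getD (i + 1, j) 0 + cnt.getD (i - 1, j) 0 +
                         cnt.getD (i, j + 1) 0 + cnt.getD (i, j - 1) 0)
      else d) d) PySem.Dict.empty

-- while s >= step and cnt: cnt = {...}; s -= 1
def pvLoop (t : List (List Int)) (stepLo : Int) (cnt : PySem.Dict (Int × Int) Int)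
    (s : Int) : PySem.Dict (Int × Int) Int :=
  if _h : stepLo ≤ s ∧ cnt.items ≠ [] then
    pvLoop t stepLo (pvStep t cnt s) (s - 1)
  else cnt
termination_by (s - stepLo + 1).toNat
decreasing_by omega

def score2_alt (topomap : List (List Int)) (x : Int) (y : Int) (step : Int) : Int :=
  let n : Int := (topomap.length : Int)
  if ¬(0 ≤ x ∧ x < n ∧ 0 ≤ y ∧ y < n) then 0
  else if pvCell topomap x y ≠ step then 0
  else if step = 9 then 1
  else (pvLoop topomap step (pvBuild9 topomap) 8).getD (x, y) 0

-- ===== PRECONDITION & SPEC =====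
-- Pre_ excludes ragged maps on which Python A's recursion can hit a row shorter
-- than len(topomap) (IndexError), keeping ragged inputs only when A provably
-- returns before any such access (start out of range, or the first looked-up
-- cell already ends the recursion); on some excluded ragged inputs A still
-- returns 0 while B's full-grid comprehension raises IndexError.
def Pre_score2 (topomap : List (List Int)) (x : Int) (y : Int) (step : Int) : Prop :=
  (∀ row ∈ topomap, topomap.length ≤ row.length)
  ∨ ¬(0 ≤ x ∧ x < (topomap.length : Int) ∧ 0 ≤ y ∧ y < (topomap.length : Int))
  ∨ (x < (((PySem.List.pyGet? topomap y).getD []).length : Int) ∧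
      (pvCell topomap x y ≠ step ∨ step = 9))
instance (topomap : List (List Int)) (x : Int) (y : Int) (step : Int) : Decidable (Pre_score2 topomap x y step) := by unfold Pre_score2; infer_instance

def pvWitness_score2 : List (List Int) × Int × Int × Int := ([[0, 1], [3, 2]], 0, 0, 0)

def Spec_score2 (topomap : List (List Int)) (x : Int) (y : Int) (step : Int) (out : Int) : Prop := out = score2_alt topomap x y step
instance (topomap : List (List Int)) (x : Int) (y : Int) (step : Int) (out : Int) : Decidable (Spec_score2 topomap x y step out) := by unfold Spec_score2; infer_instance

-- ===== CLAIM (what is proved, stated in full; the proofs are below) =====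
def Claim_equal_score2 : Prop := ∀ (topomap : List (List Int)) (x : Int) (y : Int) (step : Int), Dom_score2 topomap x y step → Pre_score2 topomap x y step → Spec_score2 topomap x y step (score2 topomap x y step)

-- ===== LEMMAS AND PROOFS =====

lemma score2_out (t : List (List Int)) (x y step : Int)
    (h : ¬(0 ≤ x ∧ x < (t.length : Int)) ∨ ¬(0 ≤ y ∧ y < (t.length : Int))) :
    score2 t x y step = 0 := by
  rw [score2]; simp only [dif_pos h]

lemma score2_ne (t : List (List Int)) (x y step : Int)
    (h : pvCell t x y ≠ step) : score2 t x y step = 0 := by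
  rw [score2]
  by_cases h1 : ¬(0 ≤ x ∧ x < (t.length : Int)) ∨ ¬(0 ≤ y ∧ y < (t.length : Int))
  · simp only [dif_pos h1]
  · simp only [dif_neg h1, dif_pos h]

lemma score2_nine (t : List (List Int)) (x y : Int)
    (hx : 0 ≤ x ∧ x < (t.length : Int)) (hy : 0 ≤ y ∧ y < (t.length : Int))
    (h : pvCell t x y = 9) : score2 t x y 9 = 1 := by
  rw [score2]
  simp only [dif_neg (show ¬(¬(0 ≤ x ∧ x < (t.length : Int)) ∨ ¬(0 ≤ y ∧ y < (t.length : Int))) by tauto)]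
  simp [h]

lemma score2_rec (t : List (List Int)) (x y step : Int)
    (hx : 0 ≤ x ∧ x < (t.length : Int)) (hy : 0 ≤ y ∧ y < (t.length : Int))
    (hv : pvCell t x y = step) (h9 : step ≠ 9) :
    score2 t x y step =
      score2 t (x + 1) y (step + 1) + score2 t (x - 1) y (step + 1) +
      score2 t x (y + 1) (step + 1) + score2 t x (y - 1) (step + 1) := by
  rw [score2]
  simp only [dif_neg (show ¬(¬(0 ≤ x ∧ x < (t.length : Int)) ∨ ¬(0 ≤ y ∧ y < (t.length : Int))) by tauto)]
  simp [hv, h9]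

-- for step ≥ 10 A's recursion only dies out: every value is 0
lemma score2_gt9 (t : List (List Int)) :
    ∀ m : Nat, ∀ step x y : Int, (pvMax t + 1 - step).toNat = m → 10 ≤ step →
      score2 t x y step = 0 := by
  intro m
  induction m using Nat.strong_induction_on with
  | _ m ih =>
    intro step x y hm h10
    by_cases h1 : ¬(0 ≤ x ∧ x < (t.length : Int)) ∨ ¬(0 ≤ y ∧ y < (t.length : Int))
    · exact score2_out t x y step h1
    · by_cases h2 : pvCell t x y ≠ step
      · exact score2_ne t x y step h2
      · push Not at h1 h2
        have hle := pvCell_le t x y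
        rw [score2_rec t x y step h1.1 h1.2 h2 (by omega)]
        have hlt : (pvMax t + 1 - (step + 1)).toNat < m := by omega
        rw [ih _ hlt (step + 1) _ _ rfl (by omega), ih _ hlt (step + 1) _ _ rfl (by omega),
            ih _ hlt (step + 1) _ _ rfl (by omega), ih _ hlt (step + 1) _ _ rfl (by omega)]
        ring

-- if every count at level m is 0, so is every count at any lower level k ≤ m ≤ 9
lemma score2_zero_down (t : List (List Int)) (m : Int) (hm : m ≤ 9)
    (H : ∀ i j, score2 t i j m = 0) :
    ∀ d : Nat, ∀ k x y : Int, (m - k).toNat = d → k ≤ m → score2 t x y k = 0 := by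
  intro d
  induction d using Nat.strong_induction_on with
  | _ d ih =>
    intro k x y hd hk
    rcases eq_or_lt_of_le hk with rfl | hklt
    · exact H x y
    · by_cases h1 : ¬(0 ≤ x ∧ x < (t.length : Int)) ∨ ¬(0 ≤ y ∧ y < (t.length : Int))
      · exact score2_out t x y k h1
      · by_cases h2 : pvCell t x y ≠ k
        · exact score2_ne t x y k h2
        · push Not at h1 h2
          rw [score2_rec t x y k h1.1 h1.2 h2 (by omega)]
          have hd' : (m - (k + 1)).toNat < d := by omega
          rw [ih _ hd' (k + 1) _ _ rfl (by omega), ih _ hd' (k + 1) _ _ rfl (by omega),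
              ih _ hd' (k + 1) _ _ rfl (by omega), ih _ hd' (k + 1) _ _ rfl (by omega)]
          ring

lemma pvInner {cond : Int → Int → Prop} [∀ a b : Int, Decidable (cond a b)]
    (val : Int → Int → Int) (L : List Int) (j x y : Int)
    (d : PySem.Dict (Int × Int) Int) :
    ((L.foldl (fun d i => if cond i j then d.insert (i, j) (val i j) else d) d).getD (x, y) 0)
      = if y = j ∧ x ∈ L ∧ cond x j then val x j else d.getD (x, y) 0 := by
  induction L generalizing d with
  | nil => simp
  | cons a L ih =>
    simp only [List.foldl_cons]
    rw [ih]
    by_cases hc : cond a j <;> by_cases hxa : x = a <;> by_cases hyj : y = j <;>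
      simp_all [PySem.Dict.getD_insert, List.mem_cons, Prod.ext_iff]

lemma pvOuter {cond : Int → Int → Prop} [∀ a b : Int, Decidable (cond a b)]
    (val : Int → Int → Int) (Lj Li : List Int) (x y : Int)
    (d : PySem.Dict (Int × Int) Int) :
    ((Lj.foldl (fun d j =>
        Li.foldl (fun d i => if cond i j then d.insert (i, j) (val i j) else d) d) d).getD (x, y) 0)
      = if y ∈ Lj ∧ x ∈ Li ∧ cond x y then val x y else d.getD (x, y) 0 := by
  induction Lj generalizing d with
  | nil => simp
  | cons b Lj ih =>
    simp only [List.foldl_cons]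
    rw [ih, pvInner]
    by_cases h1 : y ∈ Lj ∧ x ∈ Li ∧ cond x y
    · simp [h1, List.mem_cons]
    · rw [if_neg h1]
      by_cases h2 : y = b ∧ x ∈ Li ∧ cond x b
      · obtain ⟨rfl, h2b, h2c⟩ := h2
        simp [h2b, h2c, List.mem_cons]
      · rw [if_neg h2, if_neg]
        rintro ⟨hmem, hx, hcnd⟩
        rw [List.mem_cons] at hmem
        rcases hmem with rfl | hmem
        · exact h2 ⟨rfl, hx, hcnd⟩
        · exact h1 ⟨hmem, hx, hcnd⟩

lemma pvBuild9_getD (t : List (List Int)) (i j : Int) :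
    (pvBuild9 t).getD (i, j) 0 = score2 t i j 9 := by
  unfold pvBuild9
  rw [pvOuter]
  simp only [PySem.List.mem_pyRange_one, PySem.Dict.getD_empty]
  split_ifs with h
  · exact (score2_nine t i j ⟨h.2.1.1, h.2.1.2⟩ ⟨h.1.1, h.1.2⟩ h.2.2).symm
  · push Not at h
    by_cases hj : 0 ≤ j ∧ j < (t.length : Int)
    · by_cases hi : 0 ≤ i ∧ i < (t.length : Int)
      · exact (score2_ne t i j 9 (h hj hi)).symm
      · exact (score2_out t i j 9 (Or.inl hi)).symm
    · exact (score2_out t i j 9 (Or.inr hj)).symm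

lemma pvStep_getD (t : List (List Int)) (cnt : PySem.Dict (Int × Int) Int) (s : Int)
    (hs : s ≤ 8) (H : ∀ i j, cnt.getD (i, j) 0 = score2 t i j (s + 1)) (i j : Int) :
    (pvStep t cnt s).getD (i, j) 0 = score2 t i j s := by
  unfold pvStep
  rw [pvOuter]
  simp only [PySem.List.mem_pyRange_one, PySem.Dict.getD_empty]
  split_ifs with h
  · rw [H, H, H, H,
      score2_rec t i j s ⟨h.2.1.1, h.2.1.2⟩ ⟨h.1.1, h.1.2⟩ h.2.2 (by omega)]
  · push Not at h
    by_cases hj : 0 ≤ j ∧ j < (t.length : Int)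
    · by_cases hi : 0 ≤ i ∧ i < (t.length : Int)
      · exact (score2_ne t i j s (h hj hi)).symm
      · exact (score2_out t i j s (Or.inl hi)).symm
    · exact (score2_out t i j s (Or.inr hj)).symm

lemma pvLoop_getD (t : List (List Int)) (step : Int) :
    ∀ m : Nat, ∀ s : Int, ∀ cnt : PySem.Dict (Int × Int) Int,
      (s - step + 1).toNat = m → s ≤ 8 → step ≤ s + 1 →
      (∀ i j, cnt.getD (i, j) 0 = score2 t i j (s + 1)) →
      ∀ x y, (pvLoop t step cnt s).getD (x, y) 0 = score2 t x y step := by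
  intro m
  induction m using Nat.strong_induction_on with
  | _ m ih =>
    intro s cnt hm hs hstep H x y
    rw [pvLoop]
    by_cases hgo : step ≤ s ∧ cnt.items ≠ []
    · rw [dif_pos hgo]
      exact ih ((s - 1) - step + 1).toNat (by omega) (s - 1) (pvStep t cnt s) rfl
        (by omega) (by omega)
        (fun i j => by
          have := pvStep_getD t cnt s hs H i j
          simpa using this) x y
    · rw [dif_neg hgo]
      rw [not_and_or, not_not] at hgo
      rcases hgo with hlt | hempty
      · have hse : step = s + 1 := by omega
        rw [hse]; exact H x y
      · have hcnt : cnt = PySem.Dict.empty := by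
          apply PySem.Dict.ext; simpa using hempty
        have hz : ∀ i j, score2 t i j (s + 1) = 0 := fun i j => by
          rw [← H i j, hcnt, PySem.Dict.getD_empty]
        rw [hcnt, PySem.Dict.getD_empty]
        exact (score2_zero_down t (s + 1) (by omega) hz (s + 1 - step).toNat step x y rfl
          (by omega)).symm

-- ===== VERDICT (by name: the statement is the Claim_ definition above) =====
theorem score2_spec : Claim_equal_score2 := by
  intro t x y step _hdom _hpre
  unfold Spec_score2 score2_alt
  by_cases h1 : ¬(0 ≤ x ∧ x < (t.length : Int) ∧ 0 ≤ y ∧ y < (t.length : Int))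
  · rw [if_pos h1]
    exact score2_out t x y step (by tauto)
  · rw [if_neg h1]
    push Not at h1
    by_cases h2 : pvCell t x y ≠ step
    · rw [if_pos h2]
      exact score2_ne t x y step h2
    · rw [if_neg h2]
      push Not at h2
      by_cases h3 : step = 9
      · rw [if_pos h3]
        subst h3
        exact score2_nine t x y ⟨h1.1, h1.2.1⟩ ⟨h1.2.2.1, h1.2.2.2⟩ h2
      · rw [if_neg h3]
        by_cases h4 : step ≤ 9
        · exact (pvLoop_getD t step (8 - step + 1).toNat 8 (pvBuild9 t) rfl (by omega)
            (by omega) (fun i j => by rw [pvBuild9_getD]; norm_num) x y).symm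
        · rw [score2_gt9 t (pvMax t + 1 - step).toNat step x y rfl (by omega), pvLoop,
            dif_neg (by rintro ⟨hc, -⟩; omega), pvBuild9_getD]
          exact (score2_ne t x y 9 (by omega)).symm
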